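-- pv_equiv track=rewrite | github.com/ichabod801/t_games | gambling_games/blackjack_game.py | load_table
-- ===== SOURCE A (Python) =====
-- def load_table(text, columns = 10):
--     """
--     Load a condensed table. (list of list of str)
--
--     Parameters:
--     text: The table condensed to a string. (str)
--     columns: The expected number of columns in the table. (int)
--     """
--     # Set up the parsing loop.
--     table = [[]]
--     key = ''
--     count = 0
--     # Loop through the characters.
--     for char in text + 'x':
--         # Pull out the repetitions.
--         if char.isdigit():
--             count = count * 10 + int(char)
--         # Fill in the table when you find a new key.
--         elif count:
--             for key_index in range(count):
--                 table[-1].append(key)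
--                 if len(table[-1]) == columns:
--                     table.append([])
--             key = char
--             count = 0
--         # Pull out the keys.
--         else:
--             key += char
--     # Trim empty rows.
--     if not table[-1]:
--         table.pop()
--     # Return the table.
--     return table
-- ===== SOURCE B (Python) =====
-- def load_table(text, columns = 10):
--     """
--     Load a condensed table. (list of list of str)
--
--     Two-phase: scan the text run by run to build the flat list of cells,
--     then chunk that list into rows of `columns` cells.
--     """
--     flat = []
--     key = []
--     i = 0
--     n = len(text)
--     while i < n:
--         if text[i].isdigit():
--             j = i + 1
--             while j < n and text[j].isdigit():
--                 j += 1
--             count = int(text[i:j])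
--             if count:
--                 flat.extend([''.join(key)] * count)
--                 key = []
--             i = j
--         else:
--             key.append(text[i])
--             i += 1
--     return [flat[i:i + columns] for i in range(0, len(flat), columns)]
-- ===== Notes on version B (the rewrite author's own statement) =====
-- stated objective: alternative
-- what changed: Replaces A's single interleaved character state machine (sentinel 'x', digit accumulator, on-the-fly row filling) with a two-phase decomposition: scan the text run by run to build the flat list of cells, then chunk that list into rows arithmetically.
-- outside the precondition, e.g. on load_table('a2', 0): A returns [['a', 'a']], B raises ValueError; on load_table('a2', -1): A returns [['a', 'a']], B returns []
import Mathlib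
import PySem

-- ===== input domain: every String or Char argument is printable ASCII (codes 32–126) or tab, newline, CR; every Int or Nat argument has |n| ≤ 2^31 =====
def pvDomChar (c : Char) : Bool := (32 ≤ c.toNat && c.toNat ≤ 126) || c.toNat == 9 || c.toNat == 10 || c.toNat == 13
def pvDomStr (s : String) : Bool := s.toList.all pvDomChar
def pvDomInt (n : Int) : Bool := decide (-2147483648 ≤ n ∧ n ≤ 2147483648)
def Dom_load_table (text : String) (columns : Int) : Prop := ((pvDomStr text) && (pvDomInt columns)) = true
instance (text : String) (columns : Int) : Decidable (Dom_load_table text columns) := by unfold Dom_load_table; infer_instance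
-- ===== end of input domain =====

-- B replaces A's single interleaved character state machine (sentinel 'x', digit accumulator,
-- on-the-fly row filling) with a two-phase decomposition: scan digit runs to build the flat cell
-- list, then chunk it into rows arithmetically (objective: alternative, same behaviour on Pre_).

-- ===== PORT A =====
-- inner 'for key_index in range(count)' loop of A
def pvFillA (columns : Int) (key : String) : Nat → List (List String) × List String → List (List String) × List String
  | 0, st => st
  | n + 1, (acc, cur) =>
    let cur' := cur ++ [key]
    if (cur'.length : Int) = columns then pvFillA columns key n (acc ++ [cur'], [])
    else pvFillA columns key n (acc, cur')

-- one iteration of A's 'for char in text + "x"' loop; state = (table as done-rows × last row, key, count)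
def pvStepA (columns : Int) (st : (List (List String) × List String) × String × Nat) (c : Char) :
    (List (List String) × List String) × String × Nat :=
  if c.isDigit then (st.1, st.2.1, st.2.2 * 10 + (c.toNat - 48))
  else if st.2.2 ≠ 0 then (pvFillA columns st.2.1 st.2.2 st.1, String.ofList [c], 0)
  else (st.1, st.2.1 ++ String.ofList [c], st.2.2)

def load_table (text : String) (columns : Int) : List (List String) :=
  let st := (text ++ "x").toList.foldl (pvStepA columns) (([], []), "", 0)
  -- trim: 'if not table[-1]: table.pop()'
  if st.1.2 = [] then st.1.1 else st.1.1 ++ [st.1.2]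

-- ===== PORT B =====
-- int(text[i:j]) ported by hand as the decimal value of the slice; exact there because that
-- slice is a nonempty run of ASCII digits (absorbs leading zeros like Python's int()).
def pvDigitVal (ds : List Char) : Nat := ds.foldl (fun a c => a * 10 + (c.toNat - 48)) 0

-- B's 'while i < n' scan; the index arithmetic 'i'/'j' becomes peeling runs off the remaining list
def pvTokLoopB : List Char → List Char → List String → List String
  | [], _, flat => flat
  | c :: r, keybuf, flat =>
    if hdig : c.isDigit then
      let ds := (c :: r).takeWhile Char.isDigit
      let v := pvDigitVal ds
      if v ≠ 0 then pvTokLoopB ((c :: r).drop ds.length) [] (flat ++ List.replicate v (String.ofList keybuf))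
      else pvTokLoopB ((c :: r).drop ds.length) keybuf flat
    else pvTokLoopB r (keybuf ++ [c]) flat
termination_by s _ _ => s.length
decreasing_by
  · simp [hdig]
  · simp [hdig]
  · simp

def load_table_alt (text : String) (columns : Int) : List (List String) :=
  let flat := pvTokLoopB text.toList [] []
  (PySem.List.pyRange 0 (flat.length : Int) columns).map
    (fun i => PySem.List.slice flat (some i) (some (i + columns)))

-- ===== PRECONDITION & SPEC =====
-- Pre_ excludes non-positive column counts (outside the natural domain) on inputs with at least
-- one cell: there A packs every cell into one unbounded row while B's range-step chunking raises
-- ValueError (columns = 0) or yields no rows (columns < 0); columns = 0 is also excluded when no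
-- cell exists (no nonzero digit in text) because B raises ValueError there while A returns [].
def Pre_load_table (text : String) (columns : Int) : Prop :=
  1 ≤ columns ∨ (columns < 0 ∧ ∀ c ∈ text.toList, c.isDigit → c = '0')
instance (text : String) (columns : Int) : Decidable (Pre_load_table text columns) := by
  unfold Pre_load_table; infer_instance

def pvWitness_load_table : String × Int := ("a2b3", 2)

def Spec_load_table (text : String) (columns : Int) (out : List (List String)) : Prop := out = load_table_alt text columns
instance (text : String) (columns : Int) (out : List (List String)) : Decidable (Spec_load_table text columns out) := by unfold Spec_load_table; infer_instance

-- ===== CLAIM (what is proved, stated in full; the proofs are below) =====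
def Claim_equal_load_table : Prop := ∀ (text : String) (columns : Int), Dom_load_table text columns → Pre_load_table text columns → Spec_load_table text columns (load_table text columns)

-- ===== LEMMAS AND PROOFS =====

-- Reference token stream: the (key, count) runs both programs materialise, as one char-level machine.
def pvTokens : List Char → List Char → Nat → List (List Char × Nat)
  | [], _, _ => []
  | c :: r, key, count =>
    if c.isDigit then pvTokens r key (count * 10 + (c.toNat - 48))
    else if count ≠ 0 then (key, count) :: pvTokens r [c] 0
    else pvTokens r (key ++ [c]) count

def pvFlat (ts : List (List Char × Nat)) : List String :=
  ts.flatMap (fun t => List.replicate t.2 (String.ofList t.1))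

-- pushing one cell into the (done rows, current row) state
def pvPush (columns : Int) (st : List (List String) × List String) (s : String) :
    List (List String) × List String :=
  let cur' := st.2 ++ [s]
  if (cur'.length : Int) = columns then (st.1 ++ [cur'], []) else (st.1, cur')

-- chunks of size k+1
def pvChunk (k : Nat) : List String → List (List String)
  | [] => []
  | l@(_ :: _) => l.take (k + 1) :: pvChunk k (l.drop (k + 1))
termination_by l => l.length
decreasing_by subst l; simp

theorem pvFillA_eq (columns : Int) (key : String) (n : Nat) (st : List (List String) × List String) :
    pvFillA columns key n st = (List.replicate n key).foldl (pvPush columns) st := by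
  induction n generalizing st with
  | zero => simp [pvFillA]
  | succ m ih =>
    obtain ⟨acc, cur⟩ := st
    simp only [pvFillA, List.replicate_succ, List.foldl_cons, pvPush]
    split_ifs with h <;> simp [ih]

theorem pvStepA_digit (columns : Int) (st : List (List String) × List String) (key : String)
    (count : Nat) (c : Char) (h : c.isDigit) :
    pvStepA columns (st, key, count) c = (st, key, count * 10 + (c.toNat - 48)) := by
  simp [pvStepA, h]

theorem pvStepA_flush (columns : Int) (st : List (List String) × List String) (key : String)
    (count : Nat) (c : Char) (h : c.isDigit = false) (hc : count ≠ 0) :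
    pvStepA columns (st, key, count) c = (pvFillA columns key count st, String.ofList [c], 0) := by
  simp [pvStepA, h, hc]

theorem pvStepA_key (columns : Int) (st : List (List String) × List String) (key : String)
    (c : Char) (h : c.isDigit = false) :
    pvStepA columns (st, key, 0) c = (st, key ++ String.ofList [c], 0) := by
  simp [pvStepA, h]

theorem pvA_loop (columns : Int) (cs : List Char) :
    ∀ (kl : List Char) (count : Nat) (st : List (List String) × List String),
    (cs.foldl (pvStepA columns) (st, String.ofList kl, count)).1
      = (pvFlat (pvTokens cs kl count)).foldl (pvPush columns) st := by
  induction cs with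
  | nil => intro kl count st; simp [pvTokens, pvFlat]
  | cons c r ih =>
    intro kl count st
    by_cases hd : c.isDigit
    · rw [List.foldl_cons, pvStepA_digit columns st _ count c hd]
      rw [ih kl (count * 10 + (c.toNat - 48)) st]
      simp [pvTokens, hd]
    · by_cases hc : count = 0
      · subst hc
        rw [List.foldl_cons, pvStepA_key columns st _ c (by simpa using hd),
          ← String.ofList_append, ih (kl ++ [c]) 0 st]
        simp [pvTokens, hd]
      · rw [List.foldl_cons, pvStepA_flush columns st _ count c (by simpa using hd) hc,
          ih [c] 0 (pvFillA columns (String.ofList kl) count st), pvFillA_eq]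
        simp [pvTokens, hd, hc, pvFlat]

theorem pvTokens_digits (ds : List Char) (hds : ∀ c ∈ ds, c.isDigit) :
    ∀ (u : List Char) (key : List Char) (count : Nat),
    pvTokens (ds ++ u) key count
      = pvTokens u key (ds.foldl (fun a c => a * 10 + (c.toNat - 48)) count) := by
  induction ds with
  | nil => intro u key count; simp
  | cons c r ih =>
    intro u key count
    have hc : c.isDigit := hds c (by simp)
    simp only [List.cons_append, pvTokens, hc, if_true, List.foldl_cons]
    exact ih (fun x hx => hds x (by simp [hx])) u key _

theorem pvFlat_flush (u : List Char) (key : List Char) (v : Nat) (hv : v ≠ 0)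
    (hu : ∀ c, u.head? = some c → c.isDigit = false) :
    pvFlat (pvTokens (u ++ ['x']) key v)
      = List.replicate v (String.ofList key) ++ pvFlat (pvTokens (u ++ ['x']) [] 0) := by
  cases u with
  | nil => simp [pvTokens, hv, pvFlat]
  | cons c t =>
    have hc : c.isDigit = false := hu c rfl
    simp [pvTokens, hc, hv, pvFlat]

theorem pvDropWhile_head (l : List Char) (p : Char → Bool) (c : Char)
    (h : (l.dropWhile p).head? = some c) : p c = false := by
  induction l with
  | nil => simp at h
  | cons a r ih =>
    by_cases hp : p a
    · simp [hp] at h; exact ih h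
    · simp [hp] at h; simp [h ▸ hp]

theorem pvDrop_takeWhile (l : List Char) (p : Char → Bool) :
    l.drop (l.takeWhile p).length = l.dropWhile p := by
  induction l with
  | nil => simp
  | cons c r ih => by_cases h : p c <;> simp [h, ih]

theorem pvB_loop (m : Nat) : ∀ (s : List Char), s.length ≤ m →
    ∀ (keybuf : List Char) (flat : List String),
    pvTokLoopB s keybuf flat = flat ++ pvFlat (pvTokens (s ++ ['x']) keybuf 0) := by
  induction m with
  | zero =>
    intro s hs keybuf flat
    have : s = [] := by cases s <;> simp_all
    subst this
    simp [pvTokLoopB, pvTokens, pvFlat]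
  | succ m ih =>
    intro s hs keybuf flat
    cases s with
    | nil => simp [pvTokLoopB, pvTokens, pvFlat]
    | cons c r =>
      by_cases hd : c.isDigit
      · set s := c :: r with hsdef
        have hsplit : s.takeWhile Char.isDigit ++ s.dropWhile Char.isDigit = s :=
          List.takeWhile_append_dropWhile
        have hdrop : s.drop (s.takeWhile Char.isDigit).length = s.dropWhile Char.isDigit :=
          pvDrop_takeWhile s Char.isDigit
        have hlen1 : 1 ≤ (s.takeWhile Char.isDigit).length := by
          simp [hsdef, hd]
        have hrest : (s.dropWhile Char.isDigit).length ≤ m := by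
          have h2 : (s.takeWhile Char.isDigit).length + (s.dropWhile Char.isDigit).length = s.length := by
            rw [← List.length_append, hsplit]
          omega
        have htok : pvTokens (s ++ ['x']) keybuf 0
            = pvTokens (s.dropWhile Char.isDigit ++ ['x']) keybuf (pvDigitVal (s.takeWhile Char.isDigit)) := by
          conv_lhs => rw [← hsplit]
          rw [List.append_assoc]
          exact pvTokens_digits _ (fun c hc => List.mem_takeWhile_imp hc) _ _ _
        by_cases hv : pvDigitVal (s.takeWhile Char.isDigit) ≠ 0
        · rw [hsdef, pvTokLoopB]
          simp only [hd, reduceDIte, ← hsdef, hdrop, ne_eq]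
          rw [if_pos (by simpa using hv), ih _ hrest, htok,
            pvFlat_flush _ _ _ hv (fun c hc => pvDropWhile_head s Char.isDigit c hc)]
          simp
        · simp only [ne_eq, not_not] at hv
          rw [hsdef, pvTokLoopB]
          simp only [hd, reduceDIte, ← hsdef, hdrop, ne_eq]
          rw [if_neg (by simp [hv]), ih _ hrest, htok, hv]
      · rw [pvTokLoopB]
        simp only [hd, Bool.false_eq_true, reduceDIte]
        rw [ih r (by simpa using Nat.le_of_succ_le_succ hs)]
        simp [pvTokens, hd]

theorem pvChunk_of_ne_nil (k : Nat) (l : List String) (h : l ≠ []) :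
    pvChunk k l = l.take (k + 1) :: pvChunk k (l.drop (k + 1)) := by
  cases l with
  | nil => exact absurd rfl h
  | cons a b => rw [pvChunk]

theorem pvChunkA (k : Nat) : ∀ (l : List String) (acc : List (List String)) (cur : List String),
    cur.length < k + 1 →
    (let st := l.foldl (pvPush ((k : Int) + 1)) (acc, cur)
     if st.2 = [] then st.1 else st.1 ++ [st.2]) = acc ++ pvChunk k (cur ++ l) := by
  intro l
  induction l with
  | nil =>
    intro acc cur hcur
    by_cases h : cur = []
    · simp [h, pvChunk]
    · simp only [List.foldl_nil, List.append_nil, if_neg h]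
      rw [pvChunk_of_ne_nil k cur h]
      have htake : cur.take (k + 1) = cur := List.take_of_length_le hcur.le
      have hdrop : cur.drop (k + 1) = [] := List.drop_of_length_le hcur.le
      simp [htake, hdrop, pvChunk]
  | cons x t ih =>
    intro acc cur hcur
    simp only [List.foldl_cons]
    by_cases hfull : ((cur ++ [x]).length : Int) = (k : Int) + 1
    · have hlen : (cur ++ [x]).length = k + 1 := by exact_mod_cast hfull
      have hstep : pvPush ((k : Int) + 1) (acc, cur) x = (acc ++ [cur ++ [x]], []) := by
        simp only [pvPush]
        rw [if_pos hfull]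
      rw [hstep, ih _ [] (by simp)]
      simp only [List.nil_append]
      rw [show cur ++ x :: t = (cur ++ [x]) ++ t from by simp]
      rw [pvChunk_of_ne_nil k ((cur ++ [x]) ++ t) (by simp), List.take_left' hlen,
        List.drop_left' hlen]
      simp
    · have hstep : pvPush ((k : Int) + 1) (acc, cur) x = (acc, cur ++ [x]) := by
        simp only [pvPush]
        rw [if_neg hfull]
      have hlt : (cur ++ [x]).length < k + 1 := by
        have hne : (cur ++ [x]).length ≠ k + 1 := fun hh => hfull (by exact_mod_cast hh)
        simp at hne ⊢
        omega
      rw [hstep, ih acc (cur ++ [x]) hlt]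
      simp

theorem pvRange_nil (a b s : Int) (hs : 0 < s) (h : b ≤ a) : PySem.List.pyRange a b s = [] := by
  rw [PySem.List.pyRange_of_pos a b hs, if_neg (by omega)]
  simp

theorem pvRange_cons (a b s : Int) (hs : 0 < s) (h : a < b) :
    PySem.List.pyRange a b s = a :: PySem.List.pyRange (a + s) b s := by
  have hd : (0 : Int) ≤ (b - a - 1) / s := Int.ediv_nonneg (by omega) (by omega)
  have hN : (b - a + s - 1) / s = (b - a - 1) / s + 1 := by
    have h2 : b - a + s - 1 = (b - a - 1) + 1 * s := by ring
    rw [h2, Int.add_mul_ediv_right _ _ (show s ≠ 0 by omega)]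
  rw [PySem.List.pyRange_of_pos a b hs, PySem.List.pyRange_of_pos (a + s) b hs]
  rw [if_pos h]
  by_cases h2 : a + s < b
  · rw [if_pos h2]
    have hM : b - (a + s) + s - 1 = b - a - 1 := by ring
    rw [hM, hN, Int.toNat_add hd (by norm_num)]
    simp only [Int.toNat_one]
    rw [List.range_succ_eq_map]
    simp only [List.map_cons, List.map_map]
    congr 1
    · push_cast; ring
    · apply List.map_congr_left
      intro n _
      simp only [Function.comp_apply, Nat.succ_eq_add_one]
      push_cast
      ring
  · rw [if_neg h2]
    have hz : (b - a - 1) / s = 0 := Int.ediv_eq_zero_of_lt (by omega) (by omega)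
    rw [hN, hz]
    simp

theorem pvChunkB (k : Nat) (m : Nat) : ∀ (full : List String) (a : Nat), full.length - a ≤ m →
    (PySem.List.pyRange (a : Int) (full.length : Int) ((k : Int) + 1)).map
        (fun i => PySem.List.slice full (some i) (some (i + ((k : Int) + 1))))
      = pvChunk k (full.drop a) := by
  induction m with
  | zero =>
    intro full a h
    have hle : full.length ≤ a := by omega
    rw [pvRange_nil _ _ _ (by omega) (by exact_mod_cast hle)]
    simp [List.drop_of_length_le hle, pvChunk]
  | succ m ih =>
    intro full a h
    by_cases hlt : a < full.length
    · rw [pvRange_cons _ _ _ (by omega) (by exact_mod_cast hlt)]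
      simp only [List.map_cons]
      have hcast : (a : Int) + ((k : Int) + 1) = ((a + (k + 1) : Nat) : Int) := by push_cast; ring
      have hhead : PySem.List.slice full (some (a : Int)) (some ((a : Int) + ((k : Int) + 1)))
          = (full.drop a).take (k + 1) := by
        exact_mod_cast PySem.List.slice_natCast_add full a (k + 1)
      rw [hhead, hcast, ih full (a + (k + 1)) (by omega)]
      rw [pvChunk_of_ne_nil k (full.drop a) (by
        rw [Ne, List.drop_eq_nil_iff]
        omega)]
      rw [List.drop_drop]
    · have hle : full.length ≤ a := by omega
      rw [pvRange_nil _ _ _ (by omega) (by exact_mod_cast hle)]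
      simp [List.drop_of_length_le hle, pvChunk]

theorem pvTokens_zeros (cs : List Char) (h : ∀ c ∈ cs, c.isDigit → c = '0') :
    ∀ key, pvTokens cs key 0 = [] := by
  induction cs with
  | nil => intro key; simp [pvTokens]
  | cons c r ih =>
    intro key
    have ih' := ih (fun x hx => h x (by simp [hx]))
    by_cases hd : c.isDigit
    · have h0 : c = '0' := h c (by simp) hd
      rw [pvTokens]
      simp only [h0]
      simpa using ih' key
    · rw [pvTokens]
      simp only [hd, Bool.false_eq_true, if_false, ne_eq, not_true_eq_false]
      simpa using ih' (key ++ [c])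

-- ===== VERDICT (by name: the statement is the Claim_ definition above) =====
theorem load_table_spec : Claim_equal_load_table := by
  intro text columns _ hpre
  unfold Spec_load_table
  have htl : (text ++ "x").toList = text.toList ++ ['x'] := by
    rw [String.toList_append]; simp
  have hflat : pvTokLoopB text.toList [] []
      = pvFlat (pvTokens (text.toList ++ ['x']) [] 0) := by
    simpa using pvB_loop text.toList.length text.toList le_rfl [] []
  have hempty : ("" : String) = String.ofList [] := by rfl
  unfold Pre_load_table at hpre
  rcases hpre with hpre | ⟨hneg, hz⟩
  · obtain ⟨k, rfl⟩ : ∃ kk : Nat, columns = (kk : Int) + 1 := ⟨(columns - 1).toNat, by omega⟩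
    unfold load_table load_table_alt
    simp only [htl, hflat]
    rw [hempty, pvA_loop ((k : Int) + 1) (text.toList ++ ['x']) [] 0 ([], [])]
    have := pvChunkA k (pvFlat (pvTokens (text.toList ++ ['x']) [] 0)) [] [] (by simp)
    simp only [List.nil_append] at this
    rw [this]
    rw [show ((0 : Int)) = ((0 : Nat) : Int) by rfl]
    rw [pvChunkB k (pvFlat (pvTokens (text.toList ++ ['x']) [] 0)).length _ 0 (by omega)]
    simp
  · have hz' : ∀ c ∈ text.toList ++ ['x'], c.isDigit → c = '0' := by
      intro c hc hd
      rcases List.mem_append.mp hc with hmem | hmem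
      · exact hz c hmem hd
      · simp only [List.mem_singleton] at hmem
        subst hmem
        simp at hd
    have htok : pvTokens (text.toList ++ ['x']) [] 0 = [] := pvTokens_zeros _ hz' []
    unfold load_table load_table_alt
    simp only [htl, hflat, htok, hempty]
    rw [pvA_loop columns (text.toList ++ ['x']) [] 0 ([], [])]
    simp [htok, pvFlat, PySem.List.pyRange]
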